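-- pv_equiv track=rewrite | github.com/Dudu300599/jogo_da_onca | game/logica/movimentos.py | falta_de_combatividade
-- ===== SOURCE A (Python) =====
-- def falta_de_combatividade(historico_movimentos):
--     C = set()
--     p = 0
--     for movimento in historico_movimentos:
--         movimento_tupla = tuple(sorted(movimento)) # (origem, destino)
--         if movimento_tupla in C:
--             p += 1
--         else:
--             C.add(movimento_tupla)
--     return p >= len(C) / 2
-- ===== SOURCE B (Python) =====
-- def falta_de_combatividade(historico_movimentos):
--     # Sort-then-scan: normalize each move, sort all keys, then count runs of
--     # equal keys; repeats = moves that equal their predecessor in sorted order.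
--     chaves = sorted(tuple(sorted(m)) for m in historico_movimentos)
--     distintos = 0
--     repetidos = 0
--     anterior = None
--     for k in chaves:
--         if k == anterior:
--             repetidos += 1
--         else:
--             distintos += 1
--             anterior = k
--     return repetidos * 2 >= distintos
-- ===== Notes on version B (the rewrite author's own statement) =====
-- stated objective: alternative
-- what changed: Instead of A's one-pass hash-set membership counting, B sorts the normalized moves and counts runs of equal keys in a linear scan of the sorted list (repeats = elements equal to their predecessor), then tests repetidos*2 >= distintos in integers instead of a float division.
import Mathlib
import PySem

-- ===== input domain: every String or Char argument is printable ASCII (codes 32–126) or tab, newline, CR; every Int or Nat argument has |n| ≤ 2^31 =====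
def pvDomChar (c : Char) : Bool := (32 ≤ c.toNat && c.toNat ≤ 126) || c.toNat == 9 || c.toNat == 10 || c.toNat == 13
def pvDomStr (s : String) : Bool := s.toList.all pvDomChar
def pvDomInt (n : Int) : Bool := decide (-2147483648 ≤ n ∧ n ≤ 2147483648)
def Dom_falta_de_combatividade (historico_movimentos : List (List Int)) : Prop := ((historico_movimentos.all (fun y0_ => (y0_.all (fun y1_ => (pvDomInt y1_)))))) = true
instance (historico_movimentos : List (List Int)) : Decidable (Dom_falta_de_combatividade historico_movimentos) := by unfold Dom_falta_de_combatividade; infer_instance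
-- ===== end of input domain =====

-- B replaces A's one-pass set-membership counting by sort-then-scan: sort the normalized
-- moves and count runs of equal keys (objective: alternative, same result, no speed claim).

-- ===== PORT A =====
-- A's loop body, on state (C, p): if the normalized move is already in C, p += 1, else add it.
def stepA (st : PySem.Set (List Int) × Int) (movimento : List Int) : PySem.Set (List Int) × Int :=
  let movimento_tupla := PySem.List.sorted movimento (fun x => x) false
  if PySem.Set.contains st.1 movimento_tupla then (st.1, st.2 + 1)
  else (PySem.Set.add st.1 movimento_tupla, st.2)

-- Final 'p >= len(C) / 2' is ported as the exact integer comparison len(C) <= 2*p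
-- (exact: p and len(C) are ints and float len(C)/2 and the comparison are exact for them).
def falta_de_combatividade (historico_movimentos : List (List Int)) : Bool :=
  let st := historico_movimentos.foldl stepA (PySem.Set.empty, 0)
  decide ((st.1.length : Int) ≤ 2 * st.2)

-- ===== PORT B =====
-- B's loop body, on state (distintos, repetidos, anterior): a key equal to the previous
-- distinct key is a repeat; otherwise it starts a new run and becomes 'anterior'.
def stepB (st : Int × Int × Option (List Int)) (k : List Int) : Int × Int × Option (List Int) :=
  if st.2.2 = some k then (st.1, st.2.1 + 1, st.2.2)
  else (st.1 + 1, st.2.1, some k)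

-- The outer sort compares keys by the lexicographic order on List Int (Python's tuple
-- comparison); the LinearOrder instance is passed explicitly so the order lemmas apply.
def falta_de_combatividade_alt (historico_movimentos : List (List Int)) : Bool :=
  let chaves := @PySem.List.sorted (List Int) (List Int) List.instLinearOrder.toLT
      (@LinearOrder.toDecidableLT (List Int) List.instLinearOrder)
      (historico_movimentos.map (fun m => PySem.List.sorted m (fun x => x) false))
      (fun x => x) false
  let st := chaves.foldl stepB (0, 0, none)
  decide (st.2.1 * 2 ≥ st.1)

-- ===== PRECONDITION & SPEC =====
def Spec_falta_de_combatividade (historico_movimentos : List (List Int)) (out : Bool) : Prop := out = falta_de_combatividade_alt historico_movimentos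
instance (historico_movimentos : List (List Int)) (out : Bool) : Decidable (Spec_falta_de_combatividade historico_movimentos out) := by unfold Spec_falta_de_combatividade; infer_instance

-- ===== CLAIM (what is proved, stated in full; the proofs are below) =====
def Claim_equal_falta_de_combatividade : Prop := ∀ (historico_movimentos : List (List Int)), Dom_falta_de_combatividade historico_movimentos → Spec_falta_de_combatividade historico_movimentos (falta_de_combatividade historico_movimentos)

-- ===== LEMMAS AND PROOFS =====

-- A's normalization of a move.
def pvKey (m : List Int) : List Int := PySem.List.sorted m (fun x => x) false

theorem pv_card_insert (k : List Int) (s : Finset (List Int)) :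
    (insert k s).card = (s.erase k).card + 1 := by
  by_cases h : k ∈ s
  · rw [Finset.insert_eq_self.2 h, Finset.card_erase_add_one h]
  · rw [Finset.card_insert_of_notMem h, Finset.erase_eq_of_notMem h]

-- A's set component is the set of keys seen (stepA's branch is exactly PySem.Set.add).
theorem pv_A_set (hs : List (List Int)) : ∀ (C : PySem.Set (List Int)) (p : Int),
    (hs.foldl stepA (C, p)).1 = (hs.map pvKey).foldl PySem.Set.add C := by
  induction hs with
  | nil => intro C p; simp
  | cons m t ih =>
    intro C p
    simp only [List.foldl_cons, List.map_cons, stepA, pvKey]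
    by_cases hc : PySem.Set.contains C (PySem.List.sorted m (fun x => x) false)
    · rw [if_pos hc]
      have hm := (PySem.Set.contains_iff C _).1 hc
      have hadd : PySem.Set.add C (PySem.List.sorted m (fun x => x) false) = C := by
        simp [PySem.Set.add, hm]
      rw [hadd, ih C (p + 1)]
    · rw [if_neg hc, ih _ p]

-- Each iteration of A increments p + |C| by exactly one.
theorem pv_A_count (hs : List (List Int)) : ∀ (C : PySem.Set (List Int)) (p : Int),
    (hs.foldl stepA (C, p)).2 + ((hs.foldl stepA (C, p)).1.length : Int)
      = p + C.length + hs.length := by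
  induction hs with
  | nil => intro C p; simp
  | cons m t ih =>
    intro C p
    simp only [List.foldl_cons, stepA]
    by_cases hc : PySem.Set.contains C (PySem.List.sorted m (fun x => x) false)
    · rw [if_pos hc]
      have := ih C (p + 1)
      simp only [List.length_cons]
      push_cast at *
      omega
    · rw [if_neg hc]
      have hm : (PySem.List.sorted m (fun x => x) false) ∉ C := fun h =>
        hc ((PySem.Set.contains_iff C _).2 h)
      have hlen : (PySem.Set.add C (PySem.List.sorted m (fun x => x) false)).length
          = C.length + 1 := by simp [PySem.Set.add, hm]
      have := ih (PySem.Set.add C (PySem.List.sorted m (fun x => x) false)) p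
      simp only [List.length_cons]
      rw [this, hlen]
      push_cast
      omega

-- B's scan of a ≤-sorted list counts, from state (d, r, some a) with a below everything
-- in the list, (l.toFinset.erase a).card new runs; the other elements are repeats.
theorem pv_B_scan_some (l : List (List Int)) (hl : l.Pairwise (· ≤ ·)) :
    ∀ (d r : Int) (a : List Int), (∀ x ∈ l, a ≤ x) →
    (l.foldl stepB (d, r, some a)).1 = d + ((l.toFinset.erase a).card : Int)
    ∧ (l.foldl stepB (d, r, some a)).2.1
      = r + (l.length : Int) - ((l.toFinset.erase a).card : Int) := by
  induction l with
  | nil => intro d r a _; simp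
  | cons k t ih =>
    intro d r a ha
    have hkt : ∀ x ∈ t, k ≤ x := fun x hx => (List.pairwise_cons.1 hl).1 x hx
    have ht : t.Pairwise (· ≤ ·) := (List.pairwise_cons.1 hl).2
    simp only [List.foldl_cons, stepB]
    by_cases he : (some a : Option (List Int)) = some k
    · rw [if_pos he]
      have hak : a = k := by injection he
      have hcard : ((k :: t).toFinset.erase a) = (t.toFinset.erase a) := by
        subst hak; simp [List.toFinset_cons]
      obtain ⟨h1, h2⟩ := ih ht d (r + 1) a (fun x hx => ha x (List.mem_cons_of_mem _ hx))
      rw [hcard] at *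
      refine ⟨h1, ?_⟩
      simp only [List.length_cons]
      push_cast
      omega
    · rw [if_neg he]
      have hak : a ≠ k := fun h => he (by rw [h])
      have halt : a < k := lt_of_le_of_ne (ha k List.mem_cons_self) hak
      have hanott : a ∉ t := fun h => absurd (hkt a h) (not_le_of_gt halt)
      have hcard : ((k :: t).toFinset.erase a).card = (t.toFinset.erase k).card + 1 := by
        have h1 : (k :: t).toFinset.erase a = insert k t.toFinset := by
          rw [List.toFinset_cons]
          apply Finset.erase_eq_of_notMem
          simp only [Finset.mem_insert, List.mem_toFinset]
          rintro (h | h)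
          · exact hak h
          · exact hanott h
        rw [h1, pv_card_insert]
      obtain ⟨h1, h2⟩ := ih ht (d + 1) r k hkt
      refine ⟨?_, ?_⟩
      · rw [h1, hcard]; push_cast; omega
      · rw [h2, hcard]; simp only [List.length_cons]; push_cast; omega

-- From the initial state (anterior = None) the scan counts l.toFinset.card distinct runs.
theorem pv_B_scan (l : List (List Int)) (hl : l.Pairwise (· ≤ ·)) :
    (l.foldl stepB (0, 0, none)).1 = (l.toFinset.card : Int)
    ∧ (l.foldl stepB (0, 0, none)).2.1 = (l.length : Int) - (l.toFinset.card : Int) := by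
  cases l with
  | nil => simp
  | cons k t =>
    have hkt : ∀ x ∈ t, k ≤ x := fun x hx => (List.pairwise_cons.1 hl).1 x hx
    have ht : t.Pairwise (· ≤ ·) := (List.pairwise_cons.1 hl).2
    simp only [List.foldl_cons, stepB]
    rw [if_neg (by simp : ¬((none : Option (List Int)) = some k))]
    obtain ⟨h1, h2⟩ := pv_B_scan_some t ht (0 + 1) 0 k hkt
    have hcard : (k :: t).toFinset.card = (t.toFinset.erase k).card + 1 := by
      rw [List.toFinset_cons, pv_card_insert]
    refine ⟨?_, ?_⟩
    · rw [h1, hcard]; push_cast; omega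
    · rw [h2, hcard]; simp only [List.length_cons]; push_cast; omega

-- |set(keys)| is the number of distinct keys.
theorem pv_ofList_length (xs : List (List Int)) :
    (PySem.Set.ofList xs).length = xs.toFinset.card := by
  have hnd : (PySem.Set.ofList xs).Nodup := PySem.Set.nodup_ofList xs
  have hfs : (PySem.Set.ofList xs).toFinset = xs.toFinset := by
    apply Finset.ext
    intro x
    simp [List.mem_toFinset, PySem.Set.mem_ofList]
  rw [← List.toFinset_card_of_nodup hnd, hfs]

-- The sorted key list, with the LinearOrder instances named (as in the port of B).
def pvChaves (hs : List (List Int)) : List (List Int) :=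
  @PySem.List.sorted (List Int) (List Int) List.instLinearOrder.toLT
    (@LinearOrder.toDecidableLT (List Int) List.instLinearOrder)
    (hs.map pvKey) (fun x => x) false

theorem pvChaves_pairwise (hs : List (List Int)) : (pvChaves hs).Pairwise (· ≤ ·) := by
  unfold pvChaves
  exact PySem.List.sorted_pairwise (hs.map pvKey) (fun x => x)

theorem pvChaves_perm (hs : List (List Int)) : (pvChaves hs).Perm (hs.map pvKey) := by
  unfold pvChaves
  exact @PySem.List.sorted_perm (List Int) (List Int) List.instLinearOrder.toLT
    (@LinearOrder.toDecidableLT (List Int) List.instLinearOrder) (hs.map pvKey) (fun x => x) false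

theorem falta_de_combatividade_eq_alt (hs : List (List Int)) :
    falta_de_combatividade hs = falta_de_combatividade_alt hs := by
  show decide (((hs.foldl stepA (PySem.Set.empty, 0)).1.length : Int)
        ≤ 2 * (hs.foldl stepA (PySem.Set.empty, 0)).2)
    = decide (((pvChaves hs).foldl stepB (0, 0, none)).2.1 * 2
        ≥ ((pvChaves hs).foldl stepB (0, 0, none)).1)
  rw [decide_eq_decide]
  -- A side: the fold's set is set(keys) and p + |set| = n.
  have hAset : (hs.foldl stepA (PySem.Set.empty, 0)).1 = PySem.Set.ofList (hs.map pvKey) := by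
    rw [pv_A_set hs PySem.Set.empty 0]; rfl
  have hAcnt := pv_A_count hs PySem.Set.empty 0
  rw [hAset] at hAcnt
  have hAlen : ((PySem.Set.ofList (hs.map pvKey)).length : Int)
      = ((hs.map pvKey).toFinset.card : Int) := by
    exact_mod_cast pv_ofList_length (hs.map pvKey)
  -- B side: the scan over the sorted keys counts the same distinct keys.
  obtain ⟨hB1, hB2⟩ := pv_B_scan (pvChaves hs) (pvChaves_pairwise hs)
  have hfin := List.toFinset_eq_of_perm _ _ (pvChaves_perm hs)
  have hlen := (pvChaves_perm hs).length_eq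
  rw [hB1, hB2, hfin, hlen, hAset, hAlen]
  have hemp : (PySem.Set.empty : PySem.Set (List Int)).length = 0 := rfl
  rw [hAlen, hemp] at hAcnt
  have hklen : (hs.map pvKey).length = hs.length := List.length_map ..
  rw [hklen] at *
  omega

-- ===== VERDICT (by name: the statement is the Claim_ definition above) =====
theorem falta_de_combatividade_spec : Claim_equal_falta_de_combatividade := by
  intro hs _
  exact falta_de_combatividade_eq_alt hs
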